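-- pv_equiv track=rewrite | github.com/harmslab/latticeproteins | latticeproteins/sequences.py | pairwise_hamming_distances
-- ===== SOURCE A (Python) =====
-- class SequenceError(Exception):
--     """Error with a lattice protein sequence."""
--     pass
--
-- def pairwise_hamming_distances(seqlist):
--     """Computes the pairwise Hamming distances between many sequences.
--
--     Call is: 'dlist = pairwise_hamming_distances(seqlist)'
--     'seqlist' is a list of sequences all of the same length.
--     'dlist' is returned as a list of numbers representing the
--         Hamming distances between all pairs of sequences."""
--     if not (isinstance(seqlist, list) and len(seqlist) > 1):
--         raise SequenceError("'seqlist' is not a list of at least 2 entries.")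
--     length = len(seqlist[0])
--     dlist = []
--     for i1 in range(len(seqlist)):
--         seq1 = seqlist[i1]
--         if len(seq1) != length:
--             raise SequenceError("Invalid length sequence of %r." % seq1)
--         for i2 in range(i1 + 1, len(seqlist)):
--             seq2 = seqlist[i2]
--             if len(seq2) != length:
--                 raise SequenceError("Invalid length sequence of %r." % seq1)
--             dlist.append(hamming_distance(seq1, seq2))
--     if len(dlist) != len(seqlist) * (len(seqlist) - 1) / 2:
--         raise SequenceError("Incorrect number of distances.")
--     return dlist
--
-- def hamming_distance(seq1, seq2):
--     """Returns the Hamming distance between two sequences.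
--
--     Call is: 'd = hamming_distance(seq1, seq2)'
--     'seq1' and 'seq2' are two sequences of the same length.
--     'd' is returned as the Hamming distance between these two sequences."""
--     if len(seq1) != len(seq2):
--         raise SequenceError("Sequences differ in length.")
--     d = 0
--     for i in range(len(seq1)):
--         if seq1[i] != seq2[i]:
--             d += 1
--     return d
-- ===== SOURCE B (Python) =====
-- class SequenceError(Exception):
--     """Error with a lattice protein sequence."""
--     pass
--
-- def pairwise_hamming_distances(seqlist):
--     """Column-major accumulation: validate all lengths up front, lay out one
--     zero accumulator per (i1,i2) pair (i1<i2, same order as A), then sweep the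
--     character positions as the OUTER loop, bumping every pair's accumulator
--     at each column where its two sequences disagree."""
--     if not (isinstance(seqlist, list) and len(seqlist) > 1):
--         raise SequenceError("'seqlist' is not a list of at least 2 entries.")
--     length = len(seqlist[0])
--     for seq in seqlist:
--         if len(seq) != length:
--             raise SequenceError("Invalid length sequence of %r." % seq)
--     pairs = [(s1, s2) for i, s1 in enumerate(seqlist) for s2 in seqlist[i + 1:]]
--     acc = [0] * len(pairs)
--     for p in range(length):
--         acc = [a + (s1[p] != s2[p]) for a, (s1, s2) in zip(acc, pairs)]
--     return acc
-- ===== Notes on version B (the rewrite author's own statement) =====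
-- stated objective: alternative
-- what changed: A iterates pair-by-pair with nested index loops, computing each Hamming distance to completion via a helper's own position loop; B is column-major: it validates lengths once up front, lays out a zero accumulator per pair, and then sweeps character positions as the outer loop, incrementing all pairs' accumulators per column.
import Mathlib
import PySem

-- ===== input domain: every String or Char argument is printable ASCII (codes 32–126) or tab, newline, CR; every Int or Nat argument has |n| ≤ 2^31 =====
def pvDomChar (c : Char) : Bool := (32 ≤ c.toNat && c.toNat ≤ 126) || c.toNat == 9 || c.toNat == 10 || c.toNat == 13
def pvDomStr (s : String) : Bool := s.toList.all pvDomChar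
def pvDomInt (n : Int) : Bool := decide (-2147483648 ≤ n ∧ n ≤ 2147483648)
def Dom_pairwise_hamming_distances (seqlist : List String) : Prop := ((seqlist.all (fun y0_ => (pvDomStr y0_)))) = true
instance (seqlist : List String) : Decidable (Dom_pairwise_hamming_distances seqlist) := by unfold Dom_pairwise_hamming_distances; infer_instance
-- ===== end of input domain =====

-- B is column-major: validate lengths once, lay out a zero accumulator per pair, then sweep
-- character positions as the OUTER loop, bumping each pair's accumulator per column; A is
-- pair-major with nested index loops and a helper.  Equivalence is claimed on Pre_ (≥ 2
-- sequences, all of equal length) — exactly the inputs on which the Python A returns.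

-- ===== PORT A =====
-- A's helper 'hamming_distance'.  Its 'raise SequenceError' branch (unequal lengths) is
-- modelled as returning 0; every call A makes happens after both lengths were validated
-- equal, so that branch is never taken on inputs where A returns.
def hamming_distance (seq1 seq2 : String) : Int :=
  let l1 := seq1.toList
  let l2 := seq2.toList
  if l1.length ≠ l2.length then 0  -- raise SequenceError (unreached in validated calls)
  else
    (PySem.List.pyRange 0 (l1.length : Int) 1).foldl
      (fun d i => if PySem.List.pyGetD l1 i ' ' ≠ PySem.List.pyGetD l2 i ' ' then d + 1 else d) 0

-- Exceptions are modelled by an Option accumulator: 'none' = SequenceError raised, and the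
-- function returns [] on every raise path (those inputs are outside Pre_).  The final
-- 'Incorrect number of distances' float comparison is ported as the exact integer identity.
def pairwise_hamming_distances (seqlist : List String) : List Int :=
  if 1 < seqlist.length then
    let length := (seqlist.headD "").toList.length
    let res : Option (List Int) :=
      (PySem.List.pyRange 0 (seqlist.length : Int) 1).foldl
        (fun acc i1 =>
          match acc with
          | none => none
          | some dlist =>
            let seq1 := PySem.List.pyGetD seqlist i1 ""
            if seq1.toList.length ≠ length then none
            else
              (PySem.List.pyRange (i1 + 1) (seqlist.length : Int) 1).foldl
                (fun acc2 i2 =>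
                  match acc2 with
                  | none => none
                  | some dl =>
                    let seq2 := PySem.List.pyGetD seqlist i2 ""
                    if seq2.toList.length ≠ length then none
                    else some (dl ++ [hamming_distance seq1 seq2]))
                (some dlist))
        (some [])
    match res with
    | none => []  -- SequenceError (outside Pre_)
    | some dlist =>
      if (dlist.length : Int) * 2 ≠ (seqlist.length : Int) * ((seqlist.length : Int) - 1)
      then []  -- 'Incorrect number of distances.' (never reached)
      else dlist
  else []  -- SequenceError: fewer than 2 entries (outside Pre_)

-- ===== PORT B =====
-- In-range s[p] is ported as PySem.List.pyGetD on the character list (exact there).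
def pairwise_hamming_distances_alt (seqlist : List String) : List Int :=
  if 1 < seqlist.length then
    let length := (seqlist.headD "").toList.length
    if seqlist.any (fun s => s.toList.length ≠ length) then []  -- validation loop raises (outside Pre_)
    else
      let pairs := (PySem.List.enumerate seqlist).flatMap
        (fun p => (PySem.List.slice seqlist (some (p.1 + 1)) none).map (fun s2 => (p.2, s2)))
      let acc0 := List.replicate pairs.length (0 : Int)
      (PySem.List.pyRange 0 (length : Int) 1).foldl
        (fun acc p =>
          (acc.zip pairs).map (fun q =>
            q.1 + (if PySem.List.pyGetD q.2.1.toList p ' ' ≠ PySem.List.pyGetD q.2.2.toList p ' '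
                   then 1 else 0)))
        acc0
  else []  -- SequenceError (outside Pre_)

-- ===== PRECONDITION & SPEC =====
-- Pre_ admits exactly the inputs on which the Python A returns normally: at least two
-- sequences, all of the same length (everywhere else A raises SequenceError).
def Pre_pairwise_hamming_distances (seqlist : List String) : Prop :=
  1 < seqlist.length ∧ ∀ s ∈ seqlist, s.toList.length = (seqlist.headD "").toList.length
instance (seqlist : List String) : Decidable (Pre_pairwise_hamming_distances seqlist) := by
  unfold Pre_pairwise_hamming_distances; infer_instance
def pvWitness_pairwise_hamming_distances : List String := ["AB", "BA", "AA"]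

def Spec_pairwise_hamming_distances (seqlist : List String) (out : List Int) : Prop := out = pairwise_hamming_distances_alt seqlist
instance (seqlist : List String) (out : List Int) : Decidable (Spec_pairwise_hamming_distances seqlist out) := by unfold Spec_pairwise_hamming_distances; infer_instance

-- ===== CLAIM (what is proved, stated in full; the proofs are below) =====
def Claim_equal_pairwise_hamming_distances : Prop := ∀ (seqlist : List String), Dom_pairwise_hamming_distances seqlist → Pre_pairwise_hamming_distances seqlist → Spec_pairwise_hamming_distances seqlist (pairwise_hamming_distances seqlist)

-- ===== LEMMAS AND PROOFS =====

-- One step of a loop whose Option accumulator models a raised exception.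
def optStep {α β : Type} (g : β → α → β) : Option β → α → Option β :=
  fun acc x => match acc with | none => none | some b => some (g b x)

-- Lifting a plain fold through the Option (exception) accumulator.
theorem foldl_option_some {α β : Type} (l : List α) (g : β → α → β) (init : β) :
    l.foldl (optStep g) (some init) = some (l.foldl g init) := by
  induction l generalizing init with
  | nil => rfl
  | cons x xs ih => simpa [optStep] using ih (g init x)

-- A's inner loop, once validation is known to pass, just appends one distance per element.
theorem inner_fold {L : Nat} (seq1 : String) (l : List String)
    (hl : ∀ s ∈ l, s.toList.length = L) (dl : List Int) :
    l.foldl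
        (fun acc2 seq2 =>
          match acc2 with
          | none => none
          | some d => if seq2.toList.length ≠ L then none
                      else some (d ++ [hamming_distance seq1 seq2]))
        (some dl)
      = some (dl ++ l.map (fun s2 => hamming_distance seq1 s2)) := by
  induction l generalizing dl with
  | nil => simp
  | cons x xs ih =>
    have hx : x.toList.length = L := hl x (by simp)
    simp only [List.foldl_cons, hx, ne_eq, not_true_eq_false, if_false, List.map_cons]
    rw [ih (fun s hs => hl s (by simp [hs]))]
    simp

-- Gauss: the number of pairs emitted by the nested loops.
theorem gauss (n : Nat) : (((List.range n).map (fun k => n - (k + 1))).sum) * 2 = n * (n - 1) := by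
  have h1 : (List.range n).map (fun k => n - (k + 1)) = (List.range' 0 n).reverse := by
    rw [List.reverse_range']
    exact List.map_congr_left (fun x hx => by
      have := List.mem_range.mp hx; omega)
  rw [h1, List.sum_reverse, ← List.range_eq_range',
    show (List.range n).sum = ∑ i ∈ Finset.range n, i from by simp [Finset.range, Multiset.range],
    Finset.sum_range_id_mul_two]

-- Zipping a mapped list with its source tags each element with its image.
theorem zip_map_self {α β : Type} (l : List α) (h : α → β) :
    (l.map h).zip l = l.map (fun x => (h x, x)) := by
  induction l with
  | nil => rfl
  | cons x xs ih => simp [ih]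

-- B's column-major fold commutes with the per-pair decomposition: the state is updated
-- pointwise, so the fold over positions of the mapped-zip state is the map of per-pair folds.
theorem foldl_map_zip {α β : Type} (ps : List α) (pairs : List β)
    (h : β → Int) (step : α → Int → β → Int) :
    ps.foldl (fun acc p => (acc.zip pairs).map (fun q => step p q.1 q.2)) (pairs.map h)
      = pairs.map (fun pr => ps.foldl (fun a p => step p a pr) (h pr)) := by
  induction ps generalizing h with
  | nil => rfl
  | cons p ps ih =>
    simp only [List.foldl_cons, zip_map_self, List.map_map]
    exact ih (fun pr => step p (h pr) pr)

-- ===== VERDICT (by name: the statement is the Claim_ definition above) =====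
theorem pairwise_hamming_distances_spec : Claim_equal_pairwise_hamming_distances := by
  intro seqlist _ hpre
  obtain ⟨h1, hall⟩ := hpre
  unfold Spec_pairwise_hamming_distances pairwise_hamming_distances pairwise_hamming_distances_alt
  simp only [if_pos h1]
  -- B's up-front validation passes
  have hany : (seqlist.any fun s => decide (s.toList.length ≠ (seqlist.headD "").toList.length)) = false := by
    simp only [List.any_eq_false, decide_eq_true_eq, not_not]
    intro s hs; exact hall s hs
  simp only [hany, Bool.false_eq_true, if_false]
  -- membership of indexed elements
  have hmemget : ∀ i : Int, 0 ≤ i → i < (seqlist.length : Int) → PySem.List.pyGetD seqlist i "" ∈ seqlist := by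
    intro i h0 hi
    rw [PySem.List.pyGetD_eq_getElem seqlist "" h0 hi]
    exact List.getElem_mem _
  -- A's outer fold with the validated body
  have houter :
      (PySem.List.pyRange 0 (seqlist.length : Int) 1).foldl
        (fun acc i1 =>
          match acc with
          | none => none
          | some dlist =>
            let seq1 := PySem.List.pyGetD seqlist i1 ""
            if seq1.toList.length ≠ (seqlist.headD "").toList.length then none
            else
              (PySem.List.pyRange (i1 + 1) (seqlist.length : Int) 1).foldl
                (fun acc2 i2 =>
                  match acc2 with
                  | none => none
                  | some dl =>
                    let seq2 := PySem.List.pyGetD seqlist i2 ""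
                    if seq2.toList.length ≠ (seqlist.headD "").toList.length then none
                    else some (dl ++ [hamming_distance seq1 seq2]))
                (some dlist))
        (some [])
      = some ((PySem.List.pyRange 0 (seqlist.length : Int) 1).foldl
          (fun dlist i1 =>
            dlist ++ (seqlist.drop (i1.toNat + 1)).map
              (fun s2 => hamming_distance (PySem.List.pyGetD seqlist i1 "") s2))
          []) := by
    rw [PySem.List.foldl_congr_mem _ _
      (optStep (fun dlist i1 =>
        dlist ++ (seqlist.drop (i1.toNat + 1)).map
          (fun s2 => hamming_distance (PySem.List.pyGetD seqlist i1 "") s2))) _ ?_]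
    · exact foldl_option_some _ _ _
    · intro acc i1 hi1
      obtain ⟨h0, hilt⟩ := PySem.List.mem_pyRange_one.mp hi1
      cases acc with
      | none => simp [optStep]
      | some dlist =>
        have hseq1 : (PySem.List.pyGetD seqlist i1 "").toList.length = (seqlist.headD "").toList.length :=
          hall _ (hmemget i1 h0 hilt)
        simp only [hseq1, ne_eq, not_true_eq_false, if_false]
        rw [PySem.List.foldl_pyRange_pyGetD' seqlist ""
          (fun acc2 seq2 =>
            match acc2 with
            | none => none
            | some dl =>
              if seq2.toList.length ≠ (seqlist.headD "").toList.length then none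
              else some (dl ++ [hamming_distance (PySem.List.pyGetD seqlist i1 "") seq2]))
          (some dlist) (by omega)]
        rw [show (i1 + 1).toNat = i1.toNat + 1 by omega,
          inner_fold _ _ (fun s hs => hall s (List.mem_of_mem_drop hs)) dlist]
        simp [optStep]
  rw [houter, PySem.List.foldl_append_eq_flatMap
    (fun i1 : Int => (seqlist.drop (i1.toNat + 1)).map
      (fun s2 => hamming_distance (PySem.List.pyGetD seqlist i1 "") s2)) _ []]
  simp only [List.nil_append]
  -- the final count check always passes
  have hcnt :
      ((((PySem.List.pyRange 0 (seqlist.length : Int) 1).flatMap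
        (fun i1 => (seqlist.drop (i1.toNat + 1)).map
          (fun s2 => hamming_distance (PySem.List.pyGetD seqlist i1 "") s2))).length : Int) * 2)
      = (seqlist.length : Int) * ((seqlist.length : Int) - 1) := by
    have hlen : ((PySem.List.pyRange 0 (seqlist.length : Int) 1).flatMap
        (fun i1 => (seqlist.drop (i1.toNat + 1)).map
          (fun s2 => hamming_distance (PySem.List.pyGetD seqlist i1 "") s2))).length
        = ((List.range seqlist.length).map (fun k => seqlist.length - (k + 1))).sum := by
      rw [List.length_flatMap, PySem.List.pyRange_one]
      simp only [List.map_map, sub_zero, Int.toNat_natCast, Function.comp_def, List.length_map,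
        List.length_drop, zero_add, Int.toNat_natCast]
    rw [hlen]
    have := gauss seqlist.length
    have hcast : ((((List.range seqlist.length).map (fun k => seqlist.length - (k + 1))).sum : Nat) : Int) * 2
        = ((seqlist.length * (seqlist.length - 1) : Nat) : Int) := by exact_mod_cast this
    rw [hcast, Nat.cast_mul, Nat.cast_sub (by omega : 1 ≤ seqlist.length)]
    push_cast
    ring
  simp only [ne_eq, hcnt, not_true_eq_false, if_false]
  -- B's pairs list is the same flatMap of (seq1, seq2) pairs
  have hpairs :
      (PySem.List.enumerate seqlist).flatMap
        (fun p => (PySem.List.slice seqlist (some (p.1 + 1)) none).map (fun s2 => (p.2, s2)))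
      = (PySem.List.pyRange 0 (seqlist.length : Int) 1).flatMap
          (fun i1 => (seqlist.drop (i1.toNat + 1)).map
            (fun s2 => (PySem.List.pyGetD seqlist i1 "", s2))) := by
    rw [PySem.List.enumerate_eq_map_pyRange seqlist "", PySem.List.len, List.flatMap_map]
    apply List.flatMap_congr
    intro i1 hi1
    obtain ⟨h0, _⟩ := PySem.List.mem_pyRange_one.mp hi1
    dsimp only
    rw [PySem.List.slice_from seqlist (by omega : (0:Int) ≤ i1 + 1),
      show (i1 + 1).toNat = i1.toNat + 1 by omega]
  rw [hpairs]
  -- abbreviate the shared pair list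
  set pairs := (PySem.List.pyRange 0 (seqlist.length : Int) 1).flatMap
      (fun i1 => (seqlist.drop (i1.toNat + 1)).map
        (fun s2 => (PySem.List.pyGetD seqlist i1 "", s2))) with hpairsdef
  -- every pair consists of members of seqlist
  have hmempair : ∀ pr ∈ pairs, pr.1 ∈ seqlist ∧ pr.2 ∈ seqlist := by
    intro pr hpr
    rw [hpairsdef] at hpr
    obtain ⟨i1, hi1, hpr2⟩ := List.mem_flatMap.mp hpr
    obtain ⟨s2, hs2, rfl⟩ := List.mem_map.mp hpr2
    obtain ⟨h0, hilt⟩ := PySem.List.mem_pyRange_one.mp hi1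
    exact ⟨hmemget i1 h0 hilt, List.mem_of_mem_drop hs2⟩
  -- A's distance list is the map of the helper over the pair list
  have hAside :
      (PySem.List.pyRange 0 (seqlist.length : Int) 1).flatMap
        (fun i1 => (seqlist.drop (i1.toNat + 1)).map
          (fun s2 => hamming_distance (PySem.List.pyGetD seqlist i1 "") s2))
      = pairs.map (fun pr => hamming_distance pr.1 pr.2) := by
    rw [hpairsdef, List.map_flatMap]
    apply List.flatMap_congr
    intro i1 _
    rw [List.map_map]
    rfl
  rw [hAside]
  -- B's fold over columns, decomposed per pair
  rw [show List.replicate pairs.length (0 : Int) = pairs.map (fun _ => (0 : Int)) by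
        simp [List.map_const'],
    foldl_map_zip (PySem.List.pyRange 0 ((seqlist.headD "").toList.length : Int) 1) pairs
      (fun _ => (0 : Int))
      (fun p a pr =>
        a + (if PySem.List.pyGetD pr.1.toList p ' ' ≠ PySem.List.pyGetD pr.2.toList p ' '
             then 1 else 0))]
  -- pointwise: A's helper equals B's per-pair column fold
  apply List.map_congr_left
  intro pr hpr
  obtain ⟨hm1, hm2⟩ := hmempair pr hpr
  have hl1 : pr.1.toList.length = (seqlist.headD "").toList.length := hall _ hm1
  have hl2 : pr.2.toList.length = (seqlist.headD "").toList.length := hall _ hm2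
  unfold hamming_distance
  simp only [hl1, hl2, ne_eq, not_true_eq_false, if_false]
  have hstep : (fun (d : Int) i => if PySem.List.pyGetD pr.1.toList i ' ' ≠ PySem.List.pyGetD pr.2.toList i ' ' then d + 1 else d)
      = (fun (a : Int) p => a + (if PySem.List.pyGetD pr.1.toList p ' ' ≠ PySem.List.pyGetD pr.2.toList p ' ' then 1 else 0)) := by
    funext d i; split_ifs <;> omega
  rw [hstep]
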